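-- pv_equiv track=rewrite | github.com/RogersJohn/ForgeBreaker | forgebreaker/scrapers/mtggoldfish.py | _infer_archetype
-- ===== SOURCE A (Python) =====
-- def _infer_archetype(deck_name: str) -> str:
--     """Infer archetype from deck name."""
--     name_lower = deck_name.lower()
--
--     if any(word in name_lower for word in ["aggro", "burn", "red deck", "sligh"]):
--         return "aggro"
--     if any(word in name_lower for word in ["control", "blue", "esper", "azorius"]):
--         return "control"
--     if any(word in name_lower for word in ["combo", "storm", "ramp"]):
--         return "combo"
--
--     return "midrange"  # Default
-- ===== SOURCE B (Python) =====
-- KEYWORD_RANK = {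
--     "aggro": 0, "burn": 0, "red deck": 0, "sligh": 0,
--     "control": 1, "blue": 1, "esper": 1, "azorius": 1,
--     "combo": 2, "storm": 2, "ramp": 2,
-- }
-- ARCHETYPES = ["aggro", "control", "combo", "midrange"]
--
--
-- def _infer_archetype(deck_name: str) -> str:
--     """Infer archetype from deck name (minimum matched priority rank)."""
--     name_lower = deck_name.lower()
--     best = 3  # rank of the default, "midrange"
--     for word, rank in KEYWORD_RANK.items():
--         if rank < best and word in name_lower:
--             best = rank
--     return ARCHETYPES[best]
-- ===== Notes on version B (the rewrite author's own statement) =====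
-- stated objective: alternative
-- what changed: Instead of an ordered short-circuiting if/any chain over keyword groups, B ranks every keyword, makes one flat pass over all keywords computing the minimum rank among matched ones, and indexes an archetype table with that minimum (default rank 3 = midrange).
import Mathlib
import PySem

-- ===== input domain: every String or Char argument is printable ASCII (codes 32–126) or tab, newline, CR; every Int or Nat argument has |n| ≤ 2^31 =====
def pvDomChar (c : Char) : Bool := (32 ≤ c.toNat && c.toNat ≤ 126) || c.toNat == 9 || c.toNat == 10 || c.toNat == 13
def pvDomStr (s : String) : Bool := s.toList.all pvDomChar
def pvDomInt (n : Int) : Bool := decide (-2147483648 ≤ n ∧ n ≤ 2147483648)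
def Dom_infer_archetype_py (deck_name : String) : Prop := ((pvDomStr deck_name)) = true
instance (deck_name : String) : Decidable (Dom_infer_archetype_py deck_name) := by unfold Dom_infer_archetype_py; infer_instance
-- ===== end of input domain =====

-- B replaces A's ordered short-circuiting if/any chain by a single flat pass computing the minimum priority rank over all matched keywords, then indexing an archetype table (alternative decomposition, same cost).


-- ===== PORT A =====
def infer_archetype_py (deck_name : String) : String :=
  let name_lower := PySem.Str.lower deck_name
  if ["aggro", "burn", "red deck", "sligh"].any (fun word => PySem.Str.isIn word name_lower) then
    "aggro"
  else if ["control", "blue", "esper", "azorius"].any (fun word => PySem.Str.isIn word name_lower) then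
    "control"
  else if ["combo", "storm", "ramp"].any (fun word => PySem.Str.isIn word name_lower) then
    "combo"
  else
    "midrange"

-- ===== PORT B =====
-- KEYWORD_RANK.items() in insertion order
def pvKeywordRank : List (String × Nat) :=
  [("aggro", 0), ("burn", 0), ("red deck", 0), ("sligh", 0),
   ("control", 1), ("blue", 1), ("esper", 1), ("azorius", 1),
   ("combo", 2), ("storm", 2), ("ramp", 2)]

def pvArchetypes : List String := ["aggro", "control", "combo", "midrange"]

def infer_archetype_py_alt (deck_name : String) : String :=
  let name_lower := PySem.Str.lower deck_name
  let best := pvKeywordRank.foldl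
    (fun best wr => if wr.2 < best ∧ PySem.Str.isIn wr.1 name_lower then wr.2 else best) 3
  -- ARCHETYPES[best]: best ≤ 3 always, so the index is in range and the getD default is never taken
  (pvArchetypes.getD best "midrange")

-- ===== PRECONDITION & SPEC =====
def Spec_infer_archetype_py (deck_name : String) (out : String) : Prop := out = infer_archetype_py_alt deck_name
instance (deck_name : String) (out : String) : Decidable (Spec_infer_archetype_py deck_name out) := by unfold Spec_infer_archetype_py; infer_instance

-- ===== CLAIM =====
def Claim_equal_infer_archetype_py : Prop := ∀ (deck_name : String), Dom_infer_archetype_py deck_name → Spec_infer_archetype_py deck_name (infer_archetype_py deck_name)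

-- ===== LEMMAS AND PROOFS =====

-- The fold over a constant-rank segment: it lowers the accumulator to r exactly when
-- r is below the accumulator and some word of the segment occurs in nl.
theorem pv_seg_fold (nl : String) (r : Nat) (ws : List String) (acc : Nat) :
    (ws.map (fun w => (w, r))).foldl
        (fun best wr => if wr.2 < best ∧ PySem.Str.isIn wr.1 nl then wr.2 else best) acc
      = if r < acc ∧ ws.any (fun w => PySem.Str.isIn w nl) then r else acc := by
  induction ws generalizing acc with
  | nil => simp
  | cons w ws ih =>
    simp only [List.map_cons, List.foldl_cons, List.any_cons, ih]
    by_cases hw : PySem.Str.isIn w nl = true <;>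
      by_cases ha : ws.any (fun w => PySem.Str.isIn w nl) = true <;>
      simp only [hw, ha] <;> split_ifs <;> simp_all

theorem pv_rank_split : pvKeywordRank =
    (["aggro", "burn", "red deck", "sligh"].map (fun w => (w, 0)))
      ++ ((["control", "blue", "esper", "azorius"].map (fun w => (w, 1)))
      ++ (["combo", "storm", "ramp"].map (fun w => (w, 2)))) := rfl

-- ===== VERDICT =====
theorem infer_archetype_py_spec : Claim_equal_infer_archetype_py := by
  intro d _
  unfold Spec_infer_archetype_py infer_archetype_py infer_archetype_py_alt
  simp only [pv_rank_split, List.foldl_append, pv_seg_fold]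
  by_cases h0 : ["aggro", "burn", "red deck", "sligh"].any (fun w => PySem.Str.isIn w (PySem.Str.lower d)) = true <;>
    by_cases h1 : ["control", "blue", "esper", "azorius"].any (fun w => PySem.Str.isIn w (PySem.Str.lower d)) = true <;>
    by_cases h2 : ["combo", "storm", "ramp"].any (fun w => PySem.Str.isIn w (PySem.Str.lower d)) = true <;>
    simp only [Bool.not_eq_true] at * <;>
    simp only [h0, h1, h2] <;> decide
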